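-- pv_equiv track=rewrite | github.com/traderbully/local-prompt-optimizer | lpo/postmortem/patches.py | _header_depth
-- ===== SOURCE A (Python) =====
-- def _header_depth(line: str) -> int | None:
--     """Return the number of leading '#' for a Markdown header, or None
--     if ``line`` isn't a header."""
--     stripped = line.lstrip()
--     if not stripped.startswith("#"):
--         return None
--     depth = 0
--     for ch in stripped:
--         if ch == "#":
--             depth += 1
--         else:
--             break
--     if depth == 0 or depth > 6:
--         return None
--     # Real headers have a space after the #s (per CommonMark). Without
--     # that, treat as a non-header line.
--     if len(stripped) > depth and stripped[depth] != " ":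
--         return None
--     return depth
-- ===== SOURCE B (Python) =====
-- def _header_depth(line: str) -> int | None:
--     """Return the number of leading '#' for a Markdown header, or None
--     if ``line`` isn't a header."""
--     stripped = line.lstrip()
--     for depth in range(6, 0, -1):
--         if stripped.startswith("#" * depth) and (
--             len(stripped) == depth or stripped[depth] == " "
--         ):
--             return depth
--     return None
-- ===== Notes on version B (the rewrite author's own statement) =====
-- stated objective: alternative
-- what changed: Replaces the character-counting loop plus separate depth/space guards with a greedy descending trial of the six fixed hash prefixes (lengths 6 down to 1): the first depth whose prefix matches and is followed by a space or end of line wins.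
import Mathlib
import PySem

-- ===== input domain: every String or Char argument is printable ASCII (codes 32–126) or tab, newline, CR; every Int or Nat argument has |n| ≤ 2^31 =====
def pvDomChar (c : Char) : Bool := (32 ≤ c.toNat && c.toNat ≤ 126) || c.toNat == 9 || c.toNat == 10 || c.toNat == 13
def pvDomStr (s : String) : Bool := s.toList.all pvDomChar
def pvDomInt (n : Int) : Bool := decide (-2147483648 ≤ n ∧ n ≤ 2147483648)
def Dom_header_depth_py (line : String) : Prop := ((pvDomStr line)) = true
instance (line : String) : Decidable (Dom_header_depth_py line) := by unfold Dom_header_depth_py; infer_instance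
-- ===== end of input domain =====

-- B replaces A's counting loop and guards with a descending trial of the six fixed hash prefixes (alternative decomposition, same cost).

-- ===== PORT A =====
-- the 'for ch in stripped: … else break' counting loop
def pvALoop : List Char → Int → Int
  | [], d => d
  | c :: cs, d => if c = '#' then pvALoop cs (d + 1) else d

def header_depth_py (line : String) : Option Int :=
  let stripped := PySem.Str.lstrip line
  if ¬ PySem.Str.startswith stripped "#" then none
  else
    let depth := pvALoop stripped.toList 0
    if depth = 0 ∨ depth > 6 then none
    else if (PySem.Str.len stripped : Int) > depth ∧ ¬ (PySem.Str.pyGet? stripped depth = some ' ') then none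
    else some depth

-- ===== PORT B =====
-- the body of B's 'for depth in range(6, 0, -1)' loop with its early return;
-- '"#" * depth' is List.replicate d.toNat '#' (exact: every d in the range is positive)
def pvBLoop (stripped : String) : List Int → Option Int
  | [] => none
  | d :: rest =>
      if PySem.Str.startswith stripped (String.ofList (List.replicate d.toNat '#')) ∧
         ((PySem.Str.len stripped : Int) = d ∨ PySem.Str.pyGet? stripped d = some ' ') then
        some d
      else pvBLoop stripped rest

def header_depth_py_alt (line : String) : Option Int :=
  pvBLoop (PySem.Str.lstrip line) (PySem.List.pyRange 6 0 (-1))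

-- ===== PRECONDITION & SPEC =====
def Spec_header_depth_py (line : String) (out : Option Int) : Prop := out = header_depth_py_alt line
instance (line : String) (out : Option Int) : Decidable (Spec_header_depth_py line out) := by unfold Spec_header_depth_py; infer_instance

-- ===== CLAIM (what is proved, stated in full; the proofs are below) =====
def Claim_equal_header_depth_py : Prop := ∀ (line : String), Dom_header_depth_py line → Spec_header_depth_py line (header_depth_py line)

-- ===== LEMMAS AND PROOFS =====
-- A's counting loop on a block of n hashes followed by a non-hash (or nothing) adds n
theorem pvALoop_eq (n : Nat) (r : List Char) (hr : r.head? ≠ some '#') (d : Int) :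
    pvALoop (List.replicate n '#' ++ r) d = d + n := by
  induction n generalizing d with
  | zero =>
    cases r with
    | nil => simp [pvALoop]
    | cons c cs =>
      have hc : c ≠ '#' := by intro h; exact hr (by simp [h])
      simp [pvALoop, hc]
  | succ n ih => simp [List.replicate_succ, pvALoop, ih]; ring

-- every string decomposes as its leading hashes followed by a non-hash remainder
theorem pv_decomp (l : List Char) :
    ∃ n r, l = List.replicate n '#' ++ r ∧ r.head? ≠ some '#' := by
  refine ⟨(l.takeWhile (fun c => c == '#')).length, l.dropWhile (fun c => c == '#'), ?_, ?_⟩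
  · conv_lhs => rw [← List.takeWhile_append_dropWhile (p := fun c => c == '#') (l := l)]
    congr 1
    apply List.eq_replicate_of_mem
    intro b hb
    simpa using List.mem_takeWhile_imp hb
  · intro h
    have hh := List.head?_dropWhile_not (fun c => c == '#') l
    rw [h] at hh
    simp at hh

-- the two bodies agree on any already-stripped string
set_option maxHeartbeats 2000000 in
theorem pv_core (s : String) :
    (if ¬ PySem.Str.startswith s "#" then none
     else
       let depth := pvALoop s.toList 0
       if depth = 0 ∨ depth > 6 then none
       else if (PySem.Str.len s : Int) > depth ∧ ¬ (PySem.Str.pyGet? s depth = some ' ') then none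
       else some depth)
    = pvBLoop s [6, 5, 4, 3, 2, 1] := by
  obtain ⟨n, r, hl, hr⟩ := pv_decomp s.toList
  simp only [pvBLoop, PySem.Str.startswith_eq, PySem.Str.pyGet?_eq,
    PySem.Chars.pyGet?_eq_listPyGet?, PySem.Str.len_eq,
    String.toList_ofList, Int.toNat_one, String.reduceToList,
    hl, pvALoop_eq n r hr 0]
  by_cases h7 : n ≤ 6
  · rcases r with _ | ⟨c, rs⟩
    · interval_cases n <;>
        simp_all [PySem.Chars.startswith, List.isPrefixOf, PySem.List.pyGet?_ofNat']
    · have hc : c ≠ '#' := by intro h; exact hr (by simp [h])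
      have hc' : '#' ≠ c := Ne.symm hc
      interval_cases n <;>
        simp_all [PySem.Chars.startswith, List.isPrefixOf, PySem.List.pyGet?_ofNat'] <;>
        (split_ifs <;> simp_all <;> omega)
  · obtain ⟨m, rfl⟩ : ∃ m, n = 7 + m := ⟨n - 7, by omega⟩
    rw [List.replicate_add] at *
    norm_num [List.replicate] at *
    simp_all [PySem.Chars.startswith, List.isPrefixOf, PySem.List.pyGet?_ofNat',
      show (6:Int) < 7 + (m:Int) by omega]
    split_ifs <;> (try simp_all) <;> omega

-- ===== VERDICT (by name: the statement is the Claim_ definition above) =====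
theorem header_depth_py_spec : Claim_equal_header_depth_py := by
  intro line _
  unfold Spec_header_depth_py header_depth_py header_depth_py_alt
  have h := pv_core (PySem.Str.lstrip line)
  rw [show PySem.List.pyRange 6 0 (-1) = [6, 5, 4, 3, 2, 1] from by decide]
  exact h
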